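-- pv_equiv track=rewrite | github.com/Deepstatsanalysis/algoexpert-1 | CodeJam/OLd/test1.py | solve
-- ===== SOURCE A (Python) =====
-- def solve(matrix):
--     diagonal = 0
--     row = 0
--     col = 0
--     for i in range(len(matrix[0])):
--         rowd = {}
--         cold = {}
--         rowTest = False
--         colTest = False
--         for j in range(len(matrix[0])):
--             if i == j:
--                 diagonal += matrix[i][j]
--             if rowTest == False:
--                 if matrix[i][j] not in rowd:
--                     rowd[matrix[i][j]] = i
--                 else:
--                     rowTest = True
--             if colTest == False:
--                 if matrix[j][i] not in cold:
--                     cold[matrix[j][i]] = j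
--                 else:
--                     colTest = True
--         if rowTest == True: row += 1
--         if colTest == True: col += 1
--     k = str(diagonal)+' '+str(row)+' '+str(col)
--     return k
-- ===== SOURCE B (Python) =====
-- def solve(matrix):
--     n = len(matrix[0])
--     diagonal = sum(matrix[i][i] for i in range(n))
--     row = sum(1 for i in range(n) if len({matrix[i][j] for j in range(n)}) != n)
--     col = sum(1 for i in range(n) if len({matrix[j][i] for j in range(n)}) != n)
--     return str(diagonal) + ' ' + str(row) + ' ' + str(col)
-- ===== Notes on version B (the rewrite author's own statement) =====
-- stated objective: simpler
-- what changed: Replaces A's single fused double loop (interleaved diagonal accumulation plus row/column dicts with early-exit flags) by three independent passes: a diagonal sum and per-row/per-column duplicate tests via set cardinality.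
import Mathlib
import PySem

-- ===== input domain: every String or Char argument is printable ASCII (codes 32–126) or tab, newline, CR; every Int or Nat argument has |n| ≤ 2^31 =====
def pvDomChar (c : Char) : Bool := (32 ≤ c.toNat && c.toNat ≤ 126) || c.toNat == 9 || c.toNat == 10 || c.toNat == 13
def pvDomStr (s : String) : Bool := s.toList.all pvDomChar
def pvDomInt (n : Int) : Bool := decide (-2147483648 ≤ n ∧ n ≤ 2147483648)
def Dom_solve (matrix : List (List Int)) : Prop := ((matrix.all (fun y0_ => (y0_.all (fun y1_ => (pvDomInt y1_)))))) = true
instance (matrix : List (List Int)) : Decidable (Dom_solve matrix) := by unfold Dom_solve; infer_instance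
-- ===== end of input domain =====

-- B replaces A's fused double loop (interleaved diagonal sum + row/col dicts with early-exit
-- flags) by three independent passes (diagonal sum; row/col duplicate tests via set size): simpler.

-- ===== PORT A =====
-- matrix[i][j]; under Pre_solve every access is in range, so the default is never returned
def pvIdx (m : List (List Int)) (i j : Int) : Int :=
  PySem.List.pyGetD (PySem.List.pyGetD m i []) j 0

-- the body of A's inner 'for j' loop: state (diagonal, rowd, cold, rowTest, colTest)
def pvInnerA (m : List (List Int)) (i : Int)
    (st : Int × PySem.Dict Int Int × PySem.Dict Int Int × Bool × Bool) (j : Int) :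
    Int × PySem.Dict Int Int × PySem.Dict Int Int × Bool × Bool :=
  let d1 := if i = j then st.1 + pvIdx m i j else st.1
  let rp : PySem.Dict Int Int × Bool :=
    if st.2.2.2.1 = false then
      (if (st.2.1.contains (pvIdx m i j)) = false then (st.2.1.insert (pvIdx m i j) i, st.2.2.2.1)
       else (st.2.1, true))
    else (st.2.1, st.2.2.2.1)
  let cp : PySem.Dict Int Int × Bool :=
    if st.2.2.2.2 = false then
      (if (st.2.2.1.contains (pvIdx m j i)) = false then (st.2.2.1.insert (pvIdx m j i) j, st.2.2.2.2)
       else (st.2.2.1, true))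
    else (st.2.2.1, st.2.2.2.2)
  (d1, rp.1, cp.1, rp.2, cp.2)

-- the body of A's outer 'for i' loop: state (diagonal, row, col)
def pvOuterA (m : List (List Int)) (n : Int) (acc : Int × Int × Int) (i : Int) : Int × Int × Int :=
  let inner := (PySem.List.pyRange 0 n 1).foldl (pvInnerA m i)
    (acc.1, PySem.Dict.empty, PySem.Dict.empty, false, false)
  (inner.1,
   if inner.2.2.2.1 = true then acc.2.1 + 1 else acc.2.1,
   if inner.2.2.2.2 = true then acc.2.2 + 1 else acc.2.2)

def solve (matrix : List (List Int)) : String :=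
  let n : Int := PySem.List.len (PySem.List.pyGetD matrix 0 [])
  let res := (PySem.List.pyRange 0 n 1).foldl (pvOuterA matrix n) (0, 0, 0)
  PySem.Int.toStr res.1 ++ " " ++ PySem.Int.toStr res.2.1 ++ " " ++ PySem.Int.toStr res.2.2

-- ===== PORT B =====
def solve_alt (matrix : List (List Int)) : String :=
  let n : Int := PySem.List.len (PySem.List.pyGetD matrix 0 [])
  let diagonal : Int := ((PySem.List.pyRange 0 n 1).map (fun i => pvIdx matrix i i)).sum
  let row : Int := ((PySem.List.pyRange 0 n 1).countP (fun i =>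
      decide (PySem.Set.len (PySem.Set.ofList ((PySem.List.pyRange 0 n 1).map (fun j => pvIdx matrix i j))) ≠ n)) : Nat)
  let col : Int := ((PySem.List.pyRange 0 n 1).countP (fun i =>
      decide (PySem.Set.len (PySem.Set.ofList ((PySem.List.pyRange 0 n 1).map (fun j => pvIdx matrix j i))) ≠ n)) : Nat)
  PySem.Int.toStr diagonal ++ " " ++ PySem.Int.toStr row ++ " " ++ PySem.Int.toStr col

-- ===== PRECONDITION & SPEC =====
-- Pre_solve: exactly the inputs where the Python returns (no IndexError): matrix nonempty,
-- with n = len(matrix[0]) at least n rows, and each of the first n rows of length ≥ n.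
def Pre_solve (matrix : List (List Int)) : Prop :=
  matrix ≠ [] ∧ (matrix.getD 0 []).length ≤ matrix.length ∧
    ∀ r ∈ matrix.take (matrix.getD 0 []).length, (matrix.getD 0 []).length ≤ r.length
instance (matrix : List (List Int)) : Decidable (Pre_solve matrix) := by
  unfold Pre_solve; infer_instance
def pvWitness_solve : List (List Int) := [[1, 2], [3, 3]]

def Spec_solve (matrix : List (List Int)) (out : String) : Prop := out = solve_alt matrix
instance (matrix : List (List Int)) (out : String) : Decidable (Spec_solve matrix out) := by
  unfold Spec_solve; infer_instance

-- ===== CLAIM (what is proved, stated in full; the proofs are below) =====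
def Claim_equal_solve : Prop := ∀ (matrix : List (List Int)), Dom_solve matrix → Pre_solve matrix → Spec_solve matrix (solve matrix)

-- ===== LEMMAS AND PROOFS =====

-- the diagonal component of A's inner loop, in isolation
def pvStepD (m : List (List Int)) (i : Int) (d : Int) (j : Int) : Int :=
  if i = j then d + pvIdx m i j else d

-- one dict-with-flag component of A's inner loop, in isolation (v j = tested value, tag j = stored value)
def pvStepF (v tag : Int → Int) (p : PySem.Dict Int Int × Bool) (j : Int) :
    PySem.Dict Int Int × Bool :=
  if p.2 = false then
    (if (p.1.contains (v j)) = false then (p.1.insert (v j) (tag j), p.2) else (p.1, true))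
  else p

theorem innerA_split (m : List (List Int)) (i : Int) (js : List Int) :
    ∀ st, js.foldl (pvInnerA m i) st =
      (js.foldl (pvStepD m i) st.1,
       (js.foldl (pvStepF (fun j => pvIdx m i j) (fun _ => i)) (st.2.1, st.2.2.2.1)).1,
       (js.foldl (pvStepF (fun j => pvIdx m j i) (fun j => j)) (st.2.2.1, st.2.2.2.2)).1,
       (js.foldl (pvStepF (fun j => pvIdx m i j) (fun _ => i)) (st.2.1, st.2.2.2.1)).2,
       (js.foldl (pvStepF (fun j => pvIdx m j i) (fun j => j)) (st.2.2.1, st.2.2.2.2)).2) := by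
  induction js with
  | nil => intro st; rfl
  | cons j t ih =>
    intro st
    simp only [List.foldl_cons]
    rw [ih]
    rfl

theorem stepF_true (v tag : Int → Int) (js : List Int) :
    ∀ d, js.foldl (pvStepF v tag) (d, true) = (d, true) := by
  induction js with
  | nil => intro d; rfl
  | cons j t ih => intro d; simp only [List.foldl_cons, pvStepF]; simpa using ih d

theorem stepF_flag (v tag : Int → Int) (js : List Int) :
    ∀ d : PySem.Dict Int Int,
      (js.foldl (pvStepF v tag) (d, false)).2
        = !decide ((js.map v).Nodup ∧ ∀ j ∈ js, d.contains (v j) = false) := by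
  induction js with
  | nil => intro d; simp
  | cons j t ih =>
    intro d
    simp only [List.foldl_cons]
    have hstep : pvStepF v tag (d, false) j
        = if d.contains (v j) = false then (d.insert (v j) (tag j), false) else (d, true) := by
      simp [pvStepF]
    rw [hstep]
    by_cases h : d.contains (v j) = false
    · rw [if_pos h, ih]
      have hiff : ((t.map v).Nodup ∧ ∀ j' ∈ t, (d.insert (v j) (tag j)).contains (v j') = false)
          ↔ (((j :: t).map v).Nodup ∧ ∀ j' ∈ j :: t, d.contains (v j') = false) := by
        simp only [List.map_cons, List.nodup_cons, List.mem_map, List.mem_cons,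
          PySem.Dict.contains_insert, Bool.or_eq_false_iff, beq_eq_false_iff_ne, ne_eq]
        constructor
        · rintro ⟨hnd, hall⟩
          refine ⟨⟨?_, hnd⟩, ?_⟩
          · rintro ⟨j', hj', hvj⟩; exact (hall j' hj').1 hvj
          · intro j' hj'
            rcases hj' with rfl | hj'
            · exact h
            · exact (hall j' hj').2
        · rintro ⟨⟨hne, hnd⟩, hall⟩
          refine ⟨hnd, fun j' hj' => ⟨?_, hall j' (Or.inr hj')⟩⟩
          intro hvj; exact hne ⟨j', hj', hvj⟩
      rw [decide_eq_decide.mpr hiff]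
    · rw [if_neg h, stepF_true]
      have h' : d.contains (v j) = true := by
        cases hc : d.contains (v j)
        · exact absurd hc h
        · rfl
      simp [h']

theorem stepD_noop (m : List (List Int)) (i : Int) (js : List Int) (h : i ∉ js) :
    ∀ d, js.foldl (pvStepD m i) d = d := by
  induction js with
  | nil => intro d; rfl
  | cons j t ih =>
    intro d
    simp only [List.foldl_cons, pvStepD]
    rw [if_neg (by rintro rfl; exact h (by simp))]
    exact ih (fun hm => h (by simp [hm])) d

theorem stepD_mem (m : List (List Int)) (i : Int) (js : List Int) (hnd : js.Nodup)
    (hmem : i ∈ js) : ∀ d, js.foldl (pvStepD m i) d = d + pvIdx m i i := by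
  induction js with
  | nil => simp at hmem
  | cons j t ih =>
    intro d
    simp only [List.foldl_cons, pvStepD]
    rcases List.mem_cons.mp hmem with rfl | hmem'
    · rw [if_pos rfl, stepD_noop m i t (List.nodup_cons.mp hnd).1]
    · rw [if_neg (by rintro rfl; exact (List.nodup_cons.mp hnd).1 hmem')]
      exact ih (List.nodup_cons.mp hnd).2 hmem' d

-- growing a PySem.Set: the size reaches s.length + l.length iff nothing was already present
theorem set_foldl_add_len (l : List Int) :
    ∀ s : List Int, (l.foldl PySem.Set.add s).length ≤ s.length + l.length ∧
      ((l.foldl PySem.Set.add s).length = s.length + l.length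
        ↔ (l.Nodup ∧ ∀ x ∈ l, x ∉ s)) := by
  induction l with
  | nil => intro s; simp
  | cons x t ih =>
    intro s
    simp only [List.foldl_cons]
    by_cases hx : x ∈ s
    · rw [PySem.Set.add_of_mem hx]
      rcases ih s with ⟨hle, -⟩
      simp only [List.length_cons]
      constructor
      · omega
      · constructor
        · intro he; omega
        · rintro ⟨-, hall⟩; exact absurd hx (hall x (by simp))
    · rw [PySem.Set.add_of_not_mem hx]
      rcases ih (s ++ [x]) with ⟨hle, hiff⟩
      simp only [List.length_append, List.length_singleton] at hle hiff
      refine ⟨by simp only [List.length_cons]; omega, ?_⟩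
      simp only [List.length_cons]
      rw [show s.length + (t.length + 1) = s.length + 1 + t.length by omega, hiff]
      constructor
      · rintro ⟨hnd, hall⟩
        have hxt : x ∉ t := fun hxt => hall x hxt (by simp)
        refine ⟨List.nodup_cons.mpr ⟨hxt, hnd⟩, ?_⟩
        intro y hy
        rcases List.mem_cons.mp hy with rfl | hy'
        · exact hx
        · exact fun hys => hall y hy' (by simp [hys])
      · rintro ⟨hnd, hall⟩
        rcases List.nodup_cons.mp hnd with ⟨hxt, hnd'⟩
        refine ⟨hnd', fun y hy hys => ?_⟩
        rcases List.mem_append.mp hys with hys' | hyx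
        · exact hall y (List.mem_cons_of_mem _ hy) hys'
        · have hyx' : y = x := by simpa using hyx
          subst hyx'
          exact hxt hy

theorem set_len_ne_iff (l : List Int) :
    (PySem.Set.len (PySem.Set.ofList l) ≠ (l.length : Int)) ↔ ¬ l.Nodup := by
  rcases set_foldl_add_len l [] with ⟨-, hiff⟩
  simp only [List.length_nil, Nat.zero_add] at hiff
  have hiff' : (l.foldl PySem.Set.add []).length = l.length ↔ l.Nodup :=
    ⟨fun h => (hiff.mp h).1, fun h => hiff.mpr ⟨h, by simp⟩⟩
  rw [PySem.Set.ofList_eq_foldl]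
  simp only [PySem.Set.len]
  rw [ne_eq, Int.natCast_inj, hiff']

-- a fold adding f i / conditional +1s is (sum, countP, countP)
theorem foldl_triple (f : Int → Int) (p q : Int → Bool) (l : List Int) :
    ∀ a b c : Int,
      l.foldl (fun acc i => ((acc.1 + f i : Int),
          (if p i = true then acc.2.1 + 1 else acc.2.1 : Int),
          (if q i = true then acc.2.2 + 1 else acc.2.2 : Int))) (a, b, c)
        = (a + (l.map f).sum, b + (l.countP p : Nat), c + (l.countP q : Nat)) := by
  induction l with
  | nil => intro a b c; simp
  | cons x t ih =>
    intro a b c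
    simp only [List.foldl_cons, List.map_cons, List.sum_cons, List.countP_cons]
    rw [ih]
    refine Prod.ext ?_ (Prod.ext ?_ ?_)
    · push_cast; ring
    · dsimp only; split_ifs <;> push_cast <;> ring
    · dsimp only; split_ifs <;> push_cast <;> ring

-- ===== VERDICT (by name: the statement is the Claim_ definition above) =====
theorem solve_spec : Claim_equal_solve := by
  intro matrix _ _
  unfold Spec_solve solve solve_alt
  dsimp only
  set n : Int := PySem.List.len (PySem.List.pyGetD matrix 0 []) with hn
  have hn0 : 0 ≤ n := by rw [hn, PySem.List.len_eq]; positivity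
  have hcast : ∀ g : Int → Int, (((PySem.List.pyRange 0 n 1).map g).length : Int) = n := by
    intro g
    rw [List.length_map, PySem.List.length_pyRange_one]
    omega
  have hstep : ∀ (acc : Int × Int × Int), ∀ i ∈ PySem.List.pyRange 0 n 1,
      pvOuterA matrix n acc i = (fun (acc : Int × Int × Int) (i : Int) =>
        ((acc.1 + pvIdx matrix i i : Int),
         (if (!decide (((PySem.List.pyRange 0 n 1).map (fun j => pvIdx matrix i j)).Nodup)) = true
            then acc.2.1 + 1 else acc.2.1 : Int),
         (if (!decide (((PySem.List.pyRange 0 n 1).map (fun j => pvIdx matrix j i)).Nodup)) = true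
            then acc.2.2 + 1 else acc.2.2 : Int))) acc i := by
    intro acc i hi
    unfold pvOuterA
    rw [innerA_split]
    dsimp only
    rw [stepD_mem matrix i _ (PySem.List.nodup_pyRange_one 0 n) hi, stepF_flag, stepF_flag]
    simp [PySem.Dict.contains_empty]
  rw [PySem.List.foldl_congr_mem _ _ _ _ hstep]
  rw [foldl_triple (fun i => pvIdx matrix i i)
      (fun i => !decide (((PySem.List.pyRange 0 n 1).map (fun j => pvIdx matrix i j)).Nodup))
      (fun i => !decide (((PySem.List.pyRange 0 n 1).map (fun j => pvIdx matrix j i)).Nodup))]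
  have hrow : ((PySem.List.pyRange 0 n 1).countP (fun i =>
        decide (PySem.Set.len (PySem.Set.ofList ((PySem.List.pyRange 0 n 1).map (fun j => pvIdx matrix i j))) ≠ n)))
      = ((PySem.List.pyRange 0 n 1).countP (fun i =>
        !decide (((PySem.List.pyRange 0 n 1).map (fun j => pvIdx matrix i j)).Nodup))) := by
    apply List.countP_congr
    intro i _
    have hlne := set_len_ne_iff ((PySem.List.pyRange 0 n 1).map (fun j => pvIdx matrix i j))
    rw [hcast (fun j => pvIdx matrix i j)] at hlne
    simp only [PySem.Set.len, ne_eq] at hlne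
    simpa using hlne
  have hcol : ((PySem.List.pyRange 0 n 1).countP (fun i =>
        decide (PySem.Set.len (PySem.Set.ofList ((PySem.List.pyRange 0 n 1).map (fun j => pvIdx matrix j i))) ≠ n)))
      = ((PySem.List.pyRange 0 n 1).countP (fun i =>
        !decide (((PySem.List.pyRange 0 n 1).map (fun j => pvIdx matrix j i)).Nodup))) := by
    apply List.countP_congr
    intro i _
    have hlne := set_len_ne_iff ((PySem.List.pyRange 0 n 1).map (fun j => pvIdx matrix j i))
    rw [hcast (fun j => pvIdx matrix j i)] at hlne
    simp only [PySem.Set.len, ne_eq] at hlne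
    simpa using hlne
  rw [hrow, hcol]
  simp only [zero_add]
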